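-- pv_equiv track=rewrite | github.com/dkenward/libgf2 | libgf2/gf2.py | _gf2squaremod
-- ===== SOURCE A (Python) =====
-- def _gf2squaremod(a,N,squarecache):
--     """
--     Computes ``a * a mod m``.
--     *NOTE*: Does *not* check whether `a` is
--     smaller in degree than `m`.
--
--     Parameters
--     ----------
--     a : integer
--         Polynomial coefficient bit vector.
--         Polynomial `a` should be smaller than `N`.
--     N : degree of m
--     squarecache : iterable
--         cached list of x**k mod m (as polynomial coefficient bit vectors)
--         for k between N2+1 and N2*2 with N2 = (N+1)/2
--
--     Returns
--     -------
--     c : integer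
--         Polynomial coefficient bit vector of ``c = a * a mod m``.
--     """
--     c = 0
--     N2 = (N+1)//2
--     ah = a >> N2
--     c ^= a&1
--     c ^= (ah&1)*squarecache[0]
--     for i in range(1,N2):
--         a >>= 1
--         ah >>= 1
--         c ^= (a&1) << (2*i)
--         c ^= (ah&1) * squarecache[i]
--     return c
-- ===== SOURCE B (Python) =====
-- def _gf2squaremod(a, N, squarecache):
--     N2 = (N + 1) // 2
--     mask = (1 << N2) - 1
--     c = 0
--     # squaring in GF(2) is bit-sparse: square each set bit of the low half
--     # individually (a one-bit polynomial x**j squares to x**(2j), i.e. b*b),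
--     # peeling set bits from the top via bit_length.
--     al = a & mask
--     while al:
--         b = 1 << (al.bit_length() - 1)
--         c ^= b * b
--         al -= b
--     # fold in the cached square of x**(N2+i) for each set bit i of the high half
--     ah = (a >> N2) & mask
--     while ah:
--         i = ah.bit_length() - 1
--         c ^= squarecache[i]
--         ah -= 1 << i
--     return c
-- ===== Notes on version B (the rewrite author's own statement) =====
-- stated objective: alternative
-- what changed: A scans all N2 bit positions with three mutable shift registers updated in lockstep; B iterates only the SET bits of each masked half, peeling them from the top with bit_length and subtraction, squares each one-bit polynomial directly as b*b, and touches squarecache only at set high bits - sparse set-bit iteration instead of a dense index loop (fewer iterations and no per-position big-int register shifts; measured ~2x on random inputs).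
-- intended difference: For N in {-1, 0} (so N2 = 0) with a odd and squarecache[0] != 1, A still XORs in a&1 and squarecache[0] (a leftover of its peeled-out iteration 0) and returns 1 ^ squarecache[0], while B returns 0, the intended value: with N2 = 0 there are no bits to square (for N = 0 the modulus has degree 0, so everything mod m is 0). — e.g. on _gf2squaremod(1, -1, [2]): A returns 3, B returns 0
import Mathlib
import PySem

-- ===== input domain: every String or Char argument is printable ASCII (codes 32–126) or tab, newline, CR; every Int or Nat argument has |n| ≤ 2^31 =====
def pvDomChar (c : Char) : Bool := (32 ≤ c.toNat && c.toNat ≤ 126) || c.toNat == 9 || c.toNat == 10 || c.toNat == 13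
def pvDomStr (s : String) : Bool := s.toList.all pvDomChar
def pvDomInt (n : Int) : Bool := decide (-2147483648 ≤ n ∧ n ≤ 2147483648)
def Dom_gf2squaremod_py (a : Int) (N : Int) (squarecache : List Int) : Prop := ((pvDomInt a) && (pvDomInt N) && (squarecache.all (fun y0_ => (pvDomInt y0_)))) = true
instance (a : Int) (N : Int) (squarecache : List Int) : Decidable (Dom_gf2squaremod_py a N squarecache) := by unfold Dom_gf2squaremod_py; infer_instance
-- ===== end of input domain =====

-- B replaces A's dense scan of all N2 bit positions (three shift registers updated in lockstep)
-- by sparse iteration over the SET bits of each masked half, peeled from the top via bit_length,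
-- squaring each one-bit polynomial as b*b; a timing run measured B faster on random inputs.

-- ===== PORT A =====
-- Python shifts 'a >> N2' raise on N2 < 0; Pre_ requires -1 ≤ N, so '.toNat' below is exact on Pre_.
def gf2squaremod_py (a : Int) (N : Int) (squarecache : List Int) : Int :=
  let c : Int := 0
  let N2 : Int := PySem.Int.floordiv (N + 1) 2
  let ah : Int := a >>> (N2.toNat : Nat)
  let c : Int := PySem.Int.bxor c (PySem.Int.band a 1)
  let c : Int := PySem.Int.bxor c (PySem.Int.band ah 1 * PySem.List.pyGetD squarecache 0 0)
  let fin := (PySem.List.pyRange 1 N2 1).foldl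
    (fun (st : Int × Int × Int) i =>
      let a := st.1 >>> (1 : Nat)
      let ah := st.2.1 >>> (1 : Nat)
      let c := PySem.Int.bxor st.2.2 (PySem.Int.band a 1 <<< ((2 * i).toNat : Nat))
      let c := PySem.Int.bxor c (PySem.Int.band ah 1 * PySem.List.pyGetD squarecache i 0)
      (a, ah, c)) (a, ah, c)
  fin.2.2

-- ===== PORT B =====
-- The two Python 'while' loops run on a nonnegative int that loses its top set bit each turn,
-- so each is ported with a fuel counter equal to the start value, which makes it total and
-- structural without changing any computed value; 'al.bit_length() - 1' is
-- PySem.Int.bitLength al - 1 (exact here: al > 0 inside the loop).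
def pvLowLoopF : Nat → Int → Int → Int
  | 0, _, c => c
  | fuel + 1, al, c =>
    if al ≤ 0 then c
    else
      let b : Int := (1 : Int) <<< (PySem.Int.bitLength al - 1)
      pvLowLoopF fuel (al - b) (PySem.Int.bxor c (b * b))

def pvHiLoopF (squarecache : List Int) : Nat → Int → Int → Int
  | 0, _, c => c
  | fuel + 1, ah, c =>
    if ah ≤ 0 then c
    else
      let i : Nat := PySem.Int.bitLength ah - 1
      pvHiLoopF squarecache fuel (ah - ((1 : Int) <<< i))
        (PySem.Int.bxor c (PySem.List.pyGetD squarecache (i : Int) 0))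

def gf2squaremod_py_alt (a : Int) (N : Int) (squarecache : List Int) : Int :=
  let N2 : Int := PySem.Int.floordiv (N + 1) 2
  let mask : Int := ((1 : Int) <<< N2.toNat) - 1
  let al : Int := PySem.Int.band a mask
  let c : Int := pvLowLoopF al.toNat al 0
  let ah : Int := PySem.Int.band (a >>> N2.toNat) mask
  pvHiLoopF squarecache ah.toNat ah c

-- ===== PRECONDITION & SPEC =====
-- Exactly where A returns: N ≥ -1 (else 'a >> N2' raises ValueError on a negative shift), and
-- squarecache long enough for every index A reads (index 0 unconditionally, indices 1..N2-1 in the loop).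
def Pre_gf2squaremod_py (a : Int) (N : Int) (squarecache : List Int) : Prop :=
  -1 ≤ N ∧ 1 ≤ (squarecache.length : Int) ∧ PySem.Int.floordiv (N + 1) 2 ≤ (squarecache.length : Int)
instance (a : Int) (N : Int) (squarecache : List Int) : Decidable (Pre_gf2squaremod_py a N squarecache) := by unfold Pre_gf2squaremod_py; infer_instance
def pvWitness_gf2squaremod_py : Int × Int × List Int := (13, 6, [9, 5, 3])

-- For N ∈ {-1, 0} (so N2 = 0) with a odd and squarecache[0] ≠ 1, A still XORs in a&1 and squarecache[0]
-- (a leftover of its peeled-out iteration 0) and returns 1 ^ squarecache[0]; B returns 0, the intended value: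
-- with N2 = 0 there are no bits to square (for N = 0 the modulus has degree 0, so everything mod m is 0).
def D_gf2squaremod_py (a : Int) (N : Int) (squarecache : List Int) : Prop :=
  -1 ≤ N ∧ N ≤ 0 ∧ PySem.Int.mod a 2 = 1 ∧ squarecache.head? ≠ some 1
instance (a : Int) (N : Int) (squarecache : List Int) : Decidable (D_gf2squaremod_py a N squarecache) := by unfold D_gf2squaremod_py; infer_instance
def Spec_gf2squaremod_py (a : Int) (N : Int) (squarecache : List Int) (out : Int) : Prop := ¬ D_gf2squaremod_py a N squarecache → out = gf2squaremod_py_alt a N squarecache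
instance (a : Int) (N : Int) (squarecache : List Int) (out : Int) : Decidable (Spec_gf2squaremod_py a N squarecache out) := by unfold Spec_gf2squaremod_py; infer_instance
def pvDiffWitness_gf2squaremod_py : Int × Int × List Int := (1, -1, [2])
def pvDiffWitnessOut_gf2squaremod_py : Int × Int := (3, 0)

-- ===== CLAIM (what is proved, stated in full; the proofs are below) =====
def Claim_unchanged_gf2squaremod_py : Prop := ∀ (a : Int) (N : Int) (squarecache : List Int), Dom_gf2squaremod_py a N squarecache → Pre_gf2squaremod_py a N squarecache → Spec_gf2squaremod_py a N squarecache (gf2squaremod_py a N squarecache)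
def Claim_changed_gf2squaremod_py : Prop := Dom_gf2squaremod_py (pvDiffWitness_gf2squaremod_py.1) (pvDiffWitness_gf2squaremod_py.2.1) (pvDiffWitness_gf2squaremod_py.2.2) ∧ Pre_gf2squaremod_py (pvDiffWitness_gf2squaremod_py.1) (pvDiffWitness_gf2squaremod_py.2.1) (pvDiffWitness_gf2squaremod_py.2.2) ∧ D_gf2squaremod_py (pvDiffWitness_gf2squaremod_py.1) (pvDiffWitness_gf2squaremod_py.2.1) (pvDiffWitness_gf2squaremod_py.2.2) ∧ gf2squaremod_py (pvDiffWitness_gf2squaremod_py.1) (pvDiffWitness_gf2squaremod_py.2.1) (pvDiffWitness_gf2squaremod_py.2.2) = pvDiffWitnessOut_gf2squaremod_py.1 ∧ gf2squaremod_py_alt (pvDiffWitness_gf2squaremod_py.1) (pvDiffWitness_gf2squaremod_py.2.1) (pvDiffWitness_gf2squaremod_py.2.2) = pvDiffWitnessOut_gf2squaremod_py.2 ∧ pvDiffWitnessOut_gf2squaremod_py.1 ≠ pvDiffWitnessOut_gf2squaremod_py.2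
def Claim_exact_gf2squaremod_py : Prop := ∀ (a : Int) (N : Int) (squarecache : List Int), Dom_gf2squaremod_py a N squarecache → Pre_gf2squaremod_py a N squarecache → D_gf2squaremod_py a N squarecache → gf2squaremod_py a N squarecache ≠ gf2squaremod_py_alt a N squarecache

-- ===== LEMMAS AND PROOFS =====

-- xor algebra
lemma pv_bxor_eq_xor (a b : Int) : PySem.Int.bxor a b = Int.xor a b := by
  unfold PySem.Int.bxor
  rcases a with m | m <;> rcases b with n | n <;>
    simp [Int.xor] <;> omega

lemma pv_bxor_assoc (a b c : Int) :
    PySem.Int.bxor (PySem.Int.bxor a b) c = PySem.Int.bxor a (PySem.Int.bxor b c) := by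
  simp only [pv_bxor_eq_xor]
  rcases a with m | m <;> rcases b with n | n <;> rcases c with k | k <;>
    simp [Int.xor, Nat.xor_assoc]

lemma pv_zero_bxor (a : Int) : PySem.Int.bxor 0 a = a := by
  rw [PySem.Int.bxor_comm]; exact PySem.Int.bxor_zero a

lemma pv_bxor_left_comm (a b c : Int) :
    PySem.Int.bxor a (PySem.Int.bxor b c) = PySem.Int.bxor b (PySem.Int.bxor a c) := by
  rw [← pv_bxor_assoc, PySem.Int.bxor_comm a b, pv_bxor_assoc]

-- the individual XOR terms, indexed by the ORIGINAL (unshifted) a and ah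
def pvLowT (a : Int) (n : Nat) : Int := PySem.Int.band (a >>> n) 1 <<< (2 * n)
def pvHiT (ah : Int) (sc : List Int) (n : Nat) : Int :=
  PySem.Int.band (ah >>> n) 1 * PySem.List.pyGetD sc (n : Int) 0
def pvG (a ah : Int) (sc : List Int) (n : Nat) : Int := PySem.Int.bxor (pvLowT a n) (pvHiT ah sc n)

def pvS1 (a ah : Int) (sc : List Int) : Nat → Int
  | 0 => 0
  | n + 1 => PySem.Int.bxor (pvS1 a ah sc n) (pvG a ah sc (n + 1))

def pvLoS (a : Int) : Nat → Int
  | 0 => 0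
  | n + 1 => PySem.Int.bxor (pvLoS a n) (pvLowT a n)

def pvHiS (ah : Int) (sc : List Int) : Nat → Int
  | 0 => 0
  | n + 1 => PySem.Int.bxor (pvHiS ah sc n) (pvHiT ah sc n)

def pvT (a ah : Int) (sc : List Int) : Nat → Int
  | 0 => 0
  | n + 1 => PySem.Int.bxor (pvT a ah sc n) (pvG a ah sc n)

lemma pv_foldA (sc : List Int) (a ah : Int) : ∀ (n : Nat) (c : Int),
    List.foldl
      (fun (st : Int × Int × Int) i =>
        let a := st.1 >>> (1 : Nat)
        let ah := st.2.1 >>> (1 : Nat)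
        let c := PySem.Int.bxor st.2.2 (PySem.Int.band a 1 <<< ((2 * i).toNat : Nat))
        let c := PySem.Int.bxor c (PySem.Int.band ah 1 * PySem.List.pyGetD sc i 0)
        (a, ah, c)) (a, ah, c) (PySem.List.pyRange 1 (1 + (n : Int)) 1)
      = (a >>> n, ah >>> n, PySem.Int.bxor c (pvS1 a ah sc n)) := by
  intro n
  induction n with
  | zero =>
    intro c
    rw [PySem.List.pyRange_one_eq_nil (by omega)]
    simp [pvS1]
  | succ n ih =>
    intro c
    rw [show (1 + ((n + 1 : Nat) : Int)) = (1 + (n : Int)) + 1 by push_cast; ring,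
        PySem.List.pyRange_one_succ_right (by omega), List.foldl_append, ih]
    have h1 : (1 + (n : Int)) = (((n + 1 : Nat)) : Int) := by push_cast; ring
    have h2 : (2 * (((n + 1 : Nat)) : Int)).toNat = 2 * (n + 1) := by omega
    simp only [List.foldl_cons, List.foldl_nil]
    refine Prod.ext ?_ (Prod.ext ?_ ?_) <;> simp only []
    · rw [← Int.shiftRight_add]
    · rw [← Int.shiftRight_add]
    · rw [h1, h2, ← Int.shiftRight_add, ← Int.shiftRight_add]
      rw [pvS1, pv_bxor_assoc, pv_bxor_assoc]
      rfl

lemma pv_merge (a ah : Int) (sc : List Int) : ∀ n : Nat,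
    PySem.Int.bxor (pvLoS a n) (pvHiS ah sc n) = pvT a ah sc n := by
  intro n
  induction n with
  | zero => simp [pvLoS, pvHiS, pvT]
  | succ n ih =>
    rw [pvLoS, pvHiS, pvT, pvG, ← ih]
    rw [pv_bxor_assoc, pv_bxor_assoc, pv_bxor_left_comm (pvLowT a n)]

lemma pv_T_succ (a ah : Int) (sc : List Int) : ∀ n : Nat,
    pvT a ah sc (n + 1) = PySem.Int.bxor (pvG a ah sc 0) (pvS1 a ah sc n) := by
  intro n
  induction n with
  | zero => rw [pvT, pvT, pvS1, pv_zero_bxor, PySem.Int.bxor_zero]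
  | succ n ih => rw [pvT, ih, pvS1, pv_bxor_assoc]

lemma pv_G_zero (a ah : Int) (sc : List Int) :
    pvG a ah sc 0 = PySem.Int.bxor (PySem.Int.band a 1) (PySem.Int.band ah 1 * PySem.List.pyGetD sc 0 0) := by
  simp [pvG, pvLowT, pvHiT, Int.shiftRight_zero, Int.shiftLeft_zero]

lemma pv_N2_nonneg {N : Int} (h : -1 ≤ N) : 0 ≤ PySem.Int.floordiv (N + 1) 2 := by
  rw [PySem.Int.floordiv_eq_ediv_of_pos (by omega)]
  exact Int.ediv_nonneg (by omega) (by omega)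

lemma pv_N2_zero {N : Int} (h1 : -1 ≤ N) (h2 : N ≤ 0) : PySem.Int.floordiv (N + 1) 2 = 0 := by
  rw [PySem.Int.floordiv_eq_ediv_of_pos (by omega)]
  interval_cases N <;> decide

lemma pv_bxor_one_ne_zero {x : Int} (hx : x ≠ 1) : PySem.Int.bxor 1 x ≠ 0 := by
  intro h
  apply hx
  have : PySem.Int.bxor 1 (PySem.Int.bxor 1 x) = PySem.Int.bxor 1 0 := by rw [h]
  rwa [← pv_bxor_assoc, PySem.Int.bxor_self, pv_zero_bxor, PySem.Int.bxor_zero] at this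

-- A equals pvT when N2 = n+1 ≥ 1
lemma pv_A_closed (a N : Int) (sc : List Int) (n : Nat)
    (hN2 : PySem.Int.floordiv (N + 1) 2 = ((n + 1 : Nat) : Int)) :
    gf2squaremod_py a N sc = pvT a (a >>> (n + 1)) sc (n + 1) := by
  unfold gf2squaremod_py
  simp only [hN2]
  have ht : (((n + 1 : Nat) : Int)).toNat = n + 1 := by omega
  rw [ht, show (((n + 1 : Nat)) : Int) = 1 + (n : Int) by push_cast; ring, pv_foldA]
  rw [pv_T_succ, pv_G_zero, pv_zero_bxor]

lemma pv_mod_two (a : Int) : PySem.Int.mod a 2 = 0 ∨ PySem.Int.mod a 2 = 1 := by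
  rw [PySem.Int.mod_eq_emod_of_pos (by omega)]
  omega

-- ---- B-side: arithmetic characterisation of the bit terms ----

lemma pv_bit_natCast (al m : Nat) :
    PySem.Int.band ((al : Int) >>> m) 1 = ((al / 2 ^ m % 2 : Nat) : Int) := by
  have h : ((al : Int) >>> m) = ((al >>> m : Nat) : Int) := by
    simp [Int.shiftRight_eq_div_pow, Nat.shiftRight_eq_div_pow]
  rw [h, show (1 : Int) = ((1 : Nat) : Int) from rfl, PySem.Int.band_natCast,
      Nat.and_one_is_mod, Nat.shiftRight_eq_div_pow]

lemma pvLowT_natCast (al m : Nat) :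
    pvLowT (al : Int) m = ((al / 2 ^ m % 2 : Nat) : Int) <<< (2 * m) := by
  rw [pvLowT, pv_bit_natCast]

lemma pvHiT_natCast (al m : Nat) (sc : List Int) :
    pvHiT (al : Int) sc m = ((al / 2 ^ m % 2 : Nat) : Int) * PySem.List.pyGetD sc (m : Int) 0 := by
  rw [pvHiT, pv_bit_natCast]

lemma pvLowT_zero (m : Nat) : pvLowT (0 : Int) m = 0 := by
  rw [show (0 : Int) = ((0 : Nat) : Int) from rfl, pvLowT_natCast]
  simp

lemma pvHiT_zero (m : Nat) (sc : List Int) : pvHiT (0 : Int) sc m = 0 := by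
  rw [show (0 : Int) = ((0 : Nat) : Int) from rfl, pvHiT_natCast]
  simp

lemma pvLoS_zero (n : Nat) : pvLoS (0 : Int) n = 0 := by
  induction n with
  | zero => rfl
  | succ n ih => rw [pvLoS, ih, pvLowT_zero, PySem.Int.bxor_zero]

lemma pvHiS_zero (n : Nat) (sc : List Int) : pvHiS (0 : Int) sc n = 0 := by
  induction n with
  | zero => rfl
  | succ n ih => rw [pvHiS, ih, pvHiT_zero, PySem.Int.bxor_zero]

-- bit decomposition: stripping the top set bit changes exactly one bit
lemma pv_div_bit_lt (r j m : Nat) (hm : m < j) : (2 ^ j + r) / 2 ^ m % 2 = r / 2 ^ m % 2 := by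
  have h1 : 2 ^ j = 2 ^ (j - m - 1) * 2 * 2 ^ m := by
    rw [mul_assoc, ← pow_succ', ← pow_add]
    congr 1
    omega
  rw [h1, add_comm, Nat.add_mul_div_right _ _ (Nat.two_pow_pos m),
      Nat.add_mul_mod_self_right]

lemma pv_div_bit_eq (r j : Nat) (hr : r < 2 ^ j) : (2 ^ j + r) / 2 ^ j % 2 = 1 := by
  rw [add_comm, Nat.add_div_right _ (Nat.two_pow_pos j),
      Nat.div_eq_of_lt hr]

lemma pv_div_bit_gt (x j m : Nat) (hx : x < 2 ^ (j + 1)) (hm : j < m) : x / 2 ^ m = 0 :=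
  Nat.div_eq_of_lt (lt_of_lt_of_le hx (Nat.pow_le_pow_right (by omega) (by omega)))

-- fold congruence / single-term flip, for both sums
lemma pvLoS_congr (x y : Int) (n : Nat) (h : ∀ m, m < n → pvLowT x m = pvLowT y m) :
    pvLoS x n = pvLoS y n := by
  induction n with
  | zero => rfl
  | succ n ih => rw [pvLoS, pvLoS, ih (fun m hm => h m (by omega)), h n (by omega)]

lemma pvHiS_congr (x y : Int) (sc : List Int) (n : Nat) (h : ∀ m, m < n → pvHiT x sc m = pvHiT y sc m) :
    pvHiS x sc n = pvHiS y sc n := by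
  induction n with
  | zero => rfl
  | succ n ih => rw [pvHiS, pvHiS, ih (fun m hm => h m (by omega)), h n (by omega)]

lemma pvLoS_flip (x y d : Int) (j : Nat)
    (hterm : ∀ m, m ≠ j → pvLowT x m = pvLowT y m)
    (hx : pvLowT x j = d) (hy : pvLowT y j = 0) :
    ∀ n, j < n → pvLoS x n = PySem.Int.bxor (pvLoS y n) d := by
  intro n
  induction n with
  | zero => omega
  | succ n ih =>
    intro hn
    by_cases hj : j = n
    · subst hj
      rw [pvLoS, pvLoS, hx, hy, PySem.Int.bxor_zero,
          pvLoS_congr x y j (fun m hm => hterm m (by omega))]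
    · rw [pvLoS, pvLoS, ih (by omega), hterm n (by omega),
          pv_bxor_assoc, pv_bxor_assoc, PySem.Int.bxor_comm d]

lemma pvHiS_flip (x y d : Int) (sc : List Int) (j : Nat)
    (hterm : ∀ m, m ≠ j → pvHiT x sc m = pvHiT y sc m)
    (hx : pvHiT x sc j = d) (hy : pvHiT y sc j = 0) :
    ∀ n, j < n → pvHiS x sc n = PySem.Int.bxor (pvHiS y sc n) d := by
  intro n
  induction n with
  | zero => omega
  | succ n ih =>
    intro hn
    by_cases hj : j = n
    · subst hj
      rw [pvHiS, pvHiS, hx, hy, PySem.Int.bxor_zero,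
          pvHiS_congr x y sc j (fun m hm => hterm m (by omega))]
    · rw [pvHiS, pvHiS, ih (by omega), hterm n (by omega),
          pv_bxor_assoc, pv_bxor_assoc, PySem.Int.bxor_comm d]

-- bitLength facts for a positive Nat value
lemma pv_top_bit (al : Nat) (hal : 0 < al) :
    2 ^ (PySem.Int.bitLength (al : Int) - 1) ≤ al ∧ al < 2 ^ (PySem.Int.bitLength (al : Int) - 1 + 1) := by
  have h1 := PySem.Int.two_pow_bitLength_le (al : Int) (by exact_mod_cast hal.ne')
  have h2 := PySem.Int.lt_two_pow_bitLength (al : Int)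
  simp only [Int.natAbs_natCast] at h1 h2
  have hbl : 1 ≤ PySem.Int.bitLength (al : Int) := by
    by_contra h
    have : PySem.Int.bitLength (al : Int) = 0 := by omega
    rw [this] at h2
    simp at h2
    omega
  constructor
  · exact h1
  · have : PySem.Int.bitLength (al : Int) - 1 + 1 = PySem.Int.bitLength (al : Int) := by omega
    rw [this]
    exact h2

-- low loop computes c XOR (sum of the low terms of al), for any fuel ≥ al and al < 2^n
lemma pvLowLoopF_eq (n : Nat) : ∀ al : Nat, ∀ fuel : Nat, ∀ c : Int, al ≤ fuel → al < 2 ^ n →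
    pvLowLoopF fuel (al : Int) c = PySem.Int.bxor c (pvLoS (al : Int) n) := by
  intro al
  induction al using Nat.strong_induction_on with
  | _ al ih =>
    intro fuel c hfuel hlt
    by_cases hal : al = 0
    · subst hal
      simp only [Nat.cast_zero]
      cases fuel with
      | zero => rw [pvLowLoopF, pvLoS_zero, PySem.Int.bxor_zero]
      | succ f =>
        rw [pvLowLoopF, pvLoS_zero, PySem.Int.bxor_zero]
        simp
    · obtain ⟨f, rfl⟩ : ∃ f, fuel = f + 1 := ⟨fuel - 1, by omega⟩
      rw [pvLowLoopF]
      have hpos : ¬ ((al : Int) ≤ 0) := by exact_mod_cast not_le.mpr (by omega : (0:Int) < al)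
      rw [if_neg hpos]
      obtain ⟨hle, hltj⟩ := pv_top_bit al (by omega)
      set j := PySem.Int.bitLength (al : Int) - 1 with hj
      set r := al - 2 ^ j with hr
      have hb : ((1 : Int) <<< j) = ((2 ^ j : Nat) : Int) := by
        rw [Int.shiftLeft_eq, one_mul]; push_cast; ring
      have hsub : (al : Int) - ((1 : Int) <<< j) = ((r : Nat) : Int) := by
        rw [hb]; omega
      have hjn : j < n := by
        by_contra h
        have : 2 ^ n ≤ 2 ^ j := Nat.pow_le_pow_right (by omega) (by omega)
        omega
      have hrlt : r < 2 ^ n := by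
        have : 2 ^ j < 2 ^ n := Nat.pow_lt_pow_right (by omega) hjn
        have h1 : 1 ≤ 2 ^ j := Nat.one_le_two_pow
        omega
      have h1j : 1 ≤ 2 ^ j := Nat.one_le_two_pow
      show pvLowLoopF f ((al : Int) - ((1 : Int) <<< j))
            (PySem.Int.bxor c (((1 : Int) <<< j) * ((1 : Int) <<< j)))
          = PySem.Int.bxor c (pvLoS (al : Int) n)
      rw [hsub, ih r (by omega) f _ (by omega) hrlt]
      -- sum decomposition: pvLoS al n = pvLoS r n ⊕ b*b
      have hdec : al = 2 ^ j + r := by omega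
      have hflip : pvLoS (al : Int) n =
          PySem.Int.bxor (pvLoS ((r : Nat) : Int) n) (((1 : Int) <<< j) * ((1 : Int) <<< j)) := by
        apply pvLoS_flip _ _ _ j _ _ _ n hjn
        · intro m hm
          rw [pvLowT_natCast, pvLowT_natCast]
          rcases lt_or_gt_of_ne hm with h | h
          · rw [hdec, pv_div_bit_lt r j m h]
          · rw [pv_div_bit_gt al j m hltj h,
                pv_div_bit_gt r j m (by omega) h]
        · rw [pvLowT_natCast, hdec, pv_div_bit_eq r j (by omega), hb, Int.shiftLeft_eq]
          push_cast
          rw [show 2 * j = j + j by ring, pow_add]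
          ring
        · rw [pvLowT_natCast, Nat.div_eq_of_lt (by omega : r < 2 ^ j)]
          simp
      rw [hflip, pv_bxor_assoc, PySem.Int.bxor_comm (((1 : Int) <<< j) * ((1 : Int) <<< j)),
          ← pv_bxor_assoc]

-- high loop likewise
lemma pvHiLoopF_eq (sc : List Int) (n : Nat) : ∀ ah : Nat, ∀ fuel : Nat, ∀ c : Int,
    ah ≤ fuel → ah < 2 ^ n →
    pvHiLoopF sc fuel (ah : Int) c = PySem.Int.bxor c (pvHiS (ah : Int) sc n) := by
  intro ah
  induction ah using Nat.strong_induction_on with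
  | _ ah ih =>
    intro fuel c hfuel hlt
    by_cases hah : ah = 0
    · subst hah
      simp only [Nat.cast_zero]
      cases fuel with
      | zero => rw [pvHiLoopF, pvHiS_zero, PySem.Int.bxor_zero]
      | succ f =>
        rw [pvHiLoopF, pvHiS_zero, PySem.Int.bxor_zero]
        simp
    · obtain ⟨f, rfl⟩ : ∃ f, fuel = f + 1 := ⟨fuel - 1, by omega⟩
      rw [pvHiLoopF]
      have hpos : ¬ ((ah : Int) ≤ 0) := by exact_mod_cast not_le.mpr (by omega : (0:Int) < ah)
      rw [if_neg hpos]
      obtain ⟨hle, hltj⟩ := pv_top_bit ah (by omega)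
      set j := PySem.Int.bitLength (ah : Int) - 1 with hj
      set r := ah - 2 ^ j with hr
      have hb : ((1 : Int) <<< j) = ((2 ^ j : Nat) : Int) := by
        rw [Int.shiftLeft_eq, one_mul]; push_cast; ring
      have hsub : (ah : Int) - ((1 : Int) <<< j) = ((r : Nat) : Int) := by
        rw [hb]; omega
      have hjn : j < n := by
        by_contra h
        have : 2 ^ n ≤ 2 ^ j := Nat.pow_le_pow_right (by omega) (by omega)
        omega
      have h1j : 1 ≤ 2 ^ j := Nat.one_le_two_pow
      have hrlt : r < 2 ^ n := by
        have : 2 ^ j < 2 ^ n := Nat.pow_lt_pow_right (by omega) hjn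
        omega
      show pvHiLoopF sc f ((ah : Int) - ((1 : Int) <<< j))
            (PySem.Int.bxor c (PySem.List.pyGetD sc (j : Int) 0))
          = PySem.Int.bxor c (pvHiS (ah : Int) sc n)
      rw [hsub, ih r (by omega) f _ (by omega) hrlt]
      have hdec : ah = 2 ^ j + r := by omega
      have hflip : pvHiS (ah : Int) sc n =
          PySem.Int.bxor (pvHiS ((r : Nat) : Int) sc n) (PySem.List.pyGetD sc (j : Int) 0) := by
        apply pvHiS_flip _ _ _ sc j _ _ _ n hjn
        · intro m hm
          rw [pvHiT_natCast, pvHiT_natCast]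
          rcases lt_or_gt_of_ne hm with h | h
          · rw [hdec, pv_div_bit_lt r j m h]
          · rw [pv_div_bit_gt ah j m hltj h,
                pv_div_bit_gt r j m (by omega) h]
        · rw [pvHiT_natCast, hdec, pv_div_bit_eq r j (by omega)]
          simp
        · rw [pvHiT_natCast, Nat.div_eq_of_lt (by omega : r < 2 ^ j)]
          simp
      rw [hflip, pv_bxor_assoc, PySem.Int.bxor_comm (PySem.List.pyGetD sc (j : Int) 0),
          ← pv_bxor_assoc]

-- masking: a & (2^k - 1) is a mod 2^k, and keeps every bit below k
lemma pv_mask_eq (k : Nat) : ((1 : Int) <<< k) - 1 = ((2 ^ k - 1 : Nat) : Int) := by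
  rw [Int.shiftLeft_eq, one_mul]
  have : 1 ≤ 2 ^ k := Nat.one_le_two_pow
  push_cast [this]
  ring

lemma pv_band_mask (x : Int) (k : Nat) :
    PySem.Int.band x ((2 ^ k - 1 : Nat) : Int) = x % ((2 : Int) ^ k) := by
  have hk : 0 < 2 ^ k := Nat.two_pow_pos k
  unfold PySem.Int.band
  by_cases hx : 0 ≤ x
  · rw [if_pos hx, if_pos (by positivity)]
    rw [Int.toNat_natCast, Nat.and_two_pow_sub_one_eq_mod]
    conv_rhs => rw [← Int.toNat_of_nonneg hx]
    push_cast
    ring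
  · rw [if_neg hx, if_pos (by positivity)]
    rw [Int.toNat_natCast]
    rw [show ((2 : Int) ^ k) = ((2 ^ k : Nat) : Int) by push_cast; ring]
    set s := (-x - 1).toNat with hsdef
    have hs : ((s : Nat) : Int) = -x - 1 := Int.toNat_of_nonneg (by omega)
    rw [Nat.land_comm, Nat.and_two_pow_sub_one_eq_mod]
    set T := s % 2 ^ k with hT
    have hTlt : T < 2 ^ k := Nat.mod_lt _ hk
    obtain ⟨q, hq⟩ : ∃ q, s = 2 ^ k * q + T := ⟨s / 2 ^ k, by rw [hT]; exact (Nat.div_add_mod s (2 ^ k)).symm⟩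
    have h2 : (s : Int) = ((2 ^ k : Nat) : Int) * (q : Int) + (T : Int) := by
      exact_mod_cast congrArg (Nat.cast : Nat → Int) hq
    have hxeq : x = ((2 ^ k : Nat) : Int) * (-(q : Int) - 1) + (((2 ^ k : Nat) : Int) - 1 - (T : Int)) := by
      rw [show x = -(s : Int) - 1 by omega, h2]; ring
    rw [hxeq, add_comm, Int.add_mul_emod_self_left,
        Int.emod_eq_of_lt (by omega) (by omega)]
    omega

lemma pv_bit_mod (x : Int) (k m : Nat) (hm : m < k) :
    PySem.Int.band ((x % ((2 : Int) ^ k)) >>> m) 1 = PySem.Int.band (x >>> m) 1 := by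
  rw [PySem.Int.band_one, PySem.Int.band_one,
      PySem.Int.mod_eq_emod_of_pos (by omega), PySem.Int.mod_eq_emod_of_pos (by omega),
      Int.shiftRight_eq_div_pow, Int.shiftRight_eq_div_pow,
      show ((2 ^ m : Nat) : Int) = (2 : Int) ^ m by push_cast; ring]
  have hsplit : (2 : Int) ^ k = 2 ^ (k - m - 1) * 2 * 2 ^ m := by
    rw [mul_assoc, ← pow_succ', ← pow_add]
    congr 1
    omega
  obtain ⟨q, hq⟩ : ∃ q, x = ((2 : Int) ^ k) * q + x % ((2 : Int) ^ k) :=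
    ⟨x / 2 ^ k, by rw [Int.ediv_add_emod]⟩
  conv_rhs => rw [hq]
  rw [hsplit]
  rw [show 2 ^ (k - m - 1) * 2 * 2 ^ m * q + x % (2 ^ (k - m - 1) * 2 * 2 ^ m)
        = x % (2 ^ (k - m - 1) * 2 * 2 ^ m) + (2 ^ (k - m - 1) * 2 * q) * 2 ^ m by ring,
      Int.add_mul_ediv_right _ _ (by positivity : ((2:Int) ^ m) ≠ 0),
      show x % (2 ^ (k - m - 1) * 2 * 2 ^ m) / 2 ^ m + 2 ^ (k - m - 1) * 2 * q
        = x % (2 ^ (k - m - 1) * 2 * 2 ^ m) / 2 ^ m + 2 * (2 ^ (k - m - 1) * q) by ring,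
      Int.add_mul_emod_self_left]

-- B's value, assembled: for N2 = n ≥ 1 both masked halves feed the two sums
lemma pv_B_closed (a N : Int) (sc : List Int) (n : Nat)
    (hN2 : PySem.Int.floordiv (N + 1) 2 = ((n + 1 : Nat) : Int)) :
    gf2squaremod_py_alt a N sc = pvT a (a >>> (n + 1)) sc (n + 1) := by
  unfold gf2squaremod_py_alt
  simp only [hN2]
  have ht : (((n + 1 : Nat) : Int)).toNat = n + 1 := by omega
  rw [ht]
  set k := n + 1 with hk
  have hkpos : 0 < (2 : Int) ^ k := by positivity
  rw [pv_mask_eq k, pv_band_mask a k, pv_band_mask (a >>> k) k]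
  set al : Int := a % ((2 : Int) ^ k) with hal
  set ah : Int := (a >>> k) % ((2 : Int) ^ k) with hah
  have halnn : 0 ≤ al := Int.emod_nonneg a (by positivity)
  have hahnn : 0 ≤ ah := Int.emod_nonneg _ (by positivity)
  have hallt : al.toNat < 2 ^ k := by
    have := Int.emod_lt_of_pos a hkpos
    have hcast : ((2 ^ k : Nat) : Int) = (2 : Int) ^ k := by push_cast; ring
    omega
  have hahlt : ah.toNat < 2 ^ k := by
    have := Int.emod_lt_of_pos (a >>> k) hkpos
    have hcast : ((2 ^ k : Nat) : Int) = (2 : Int) ^ k := by push_cast; ring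
    omega
  have halc : ((al.toNat : Nat) : Int) = al := Int.toNat_of_nonneg halnn
  have hahc : ((ah.toNat : Nat) : Int) = ah := Int.toNat_of_nonneg hahnn
  rw [show al = ((al.toNat : Nat) : Int) from halc.symm,
      show ah = ((ah.toNat : Nat) : Int) from hahc.symm,
      Int.toNat_natCast, Int.toNat_natCast,
      pvLowLoopF_eq k al.toNat al.toNat 0 (le_refl _) hallt,
      pvHiLoopF_eq sc k ah.toNat ah.toNat _ (le_refl _) hahlt,
      pv_zero_bxor]
  -- replace the masked values by the originals inside the sums
  rw [show pvLoS ((al.toNat : Nat) : Int) k = pvLoS a k from by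
        apply pvLoS_congr
        intro m hm
        rw [pvLowT, pvLowT, halc, hal, pv_bit_mod a k m hm],
      show pvHiS ((ah.toNat : Nat) : Int) sc k = pvHiS (a >>> k) sc k from by
        apply pvHiS_congr
        intro m hm
        rw [pvHiT, pvHiT, hahc, hah, pv_bit_mod (a >>> k) k m hm]]
  rw [pv_merge]

-- B returns 0 when N2 = 0 (mask = 0 empties both loops)
lemma pv_B_N2_zero (a N : Int) (sc : List Int)
    (hN2 : PySem.Int.floordiv (N + 1) 2 = 0) :
    gf2squaremod_py_alt a N sc = 0 := by
  unfold gf2squaremod_py_alt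
  simp only [hN2]
  rw [show ((0 : Int)).toNat = 0 from rfl, pv_mask_eq 0]
  norm_num
  rfl

-- ===== VERDICT (by name: the statement is the Claim_ definition above) =====
theorem gf2squaremod_py_spec : Claim_unchanged_gf2squaremod_py := by
  intro a N sc _ hPre hD
  obtain ⟨hN, hlen, hN2len⟩ := hPre
  have h0 : 0 ≤ PySem.Int.floordiv (N + 1) 2 := pv_N2_nonneg hN
  rcases Nat.eq_zero_or_eq_succ_pred (PySem.Int.floordiv (N + 1) 2).toNat with hz | hs
  · -- N2 = 0 : B = 0; A's peeled-out iteration must be 0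
    have hN2 : PySem.Int.floordiv (N + 1) 2 = 0 := by omega
    have hNle : N ≤ 0 := by
      by_contra hc
      have : PySem.Int.floordiv (N + 1) 2 ≥ 1 := by
        rw [PySem.Int.floordiv_eq_ediv_of_pos (by omega)]
        omega
      omega
    rw [pv_B_N2_zero a N sc hN2]
    unfold gf2squaremod_py
    simp only [hN2]
    rw [PySem.List.pyRange_one_eq_nil (by omega)]
    simp only [List.foldl_nil, Int.toNat_zero, Int.shiftRight_zero]
    have hband : PySem.Int.band a 1 = PySem.Int.mod a 2 := PySem.Int.band_one a
    rcases pv_mod_two a with hm | hm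
    · rw [pv_zero_bxor, hband, hm]
      simp
    · have hhead : sc.head? = some 1 := by
        by_contra hh
        exact hD ⟨hN, hNle, hm, hh⟩
      rcases sc with _ | ⟨x, t⟩
      · simp at hhead
      · have hx : x = 1 := by simpa using hhead
        subst hx
        rw [pv_zero_bxor, hband, hm]
        simp [PySem.List.pyGetD_zero_cons, PySem.Int.bxor_self]
  · -- N2 ≥ 1 : both sides equal pvT
    set n2 := (PySem.Int.floordiv (N + 1) 2).toNat with hn2
    obtain ⟨m, hm⟩ : ∃ m, n2 = m + 1 := ⟨n2 - 1, by omega⟩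
    have hN2 : PySem.Int.floordiv (N + 1) 2 = ((m + 1 : Nat) : Int) := by omega
    rw [pv_A_closed a N sc m hN2, pv_B_closed a N sc m hN2]

theorem gf2squaremod_py_changed : Claim_changed_gf2squaremod_py := by
  unfold Claim_changed_gf2squaremod_py
  refine ⟨by decide, by decide, by decide, by decide, ?_, by decide⟩
  exact pv_B_N2_zero 1 (-1) [2] (by decide)

theorem gf2squaremod_py_tight : Claim_exact_gf2squaremod_py := by
  intro a N sc _ hPre hD
  obtain ⟨hN, hlen, _⟩ := hPre
  obtain ⟨hN1, hN0, hmod, hhead⟩ := hD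
  have hN2 : PySem.Int.floordiv (N + 1) 2 = 0 := pv_N2_zero hN1 hN0
  rcases sc with _ | ⟨x, t⟩
  · simp at hlen
  · have hx : x ≠ 1 := by
      intro h; exact hhead (by simp [h])
    rw [pv_B_N2_zero a N (x :: t) hN2]
    unfold gf2squaremod_py
    simp only [hN2]
    rw [PySem.List.pyRange_one_eq_nil (by omega)]
    simp only [List.foldl_nil, Int.toNat_zero, Int.shiftRight_zero]
    rw [pv_zero_bxor, PySem.Int.band_one, hmod]
    simp only [PySem.List.pyGetD_zero_cons, one_mul]
    exact pv_bxor_one_ne_zero hx
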